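-- pv_equiv track=rewrite | github.com/alexespinoza28/offline-leetcode | orchestrator/testing/comparators.py | _character_diff
-- ===== SOURCE A (Python) =====
-- def _character_diff(expected: str, actual: str) -> str:
--     """Generate character-level diff visualization."""
--     result = []
--     i = j = 0
--
--     while i < len(expected) or j < len(actual):
--         if i < len(expected) and j < len(actual):
--             if expected[i] == actual[j]:
--                 result.append(expected[i])
--                 i += 1
--                 j += 1
--             else:
--                 result.append(f"[{expected[i]}→{actual[j]}]")
--                 i += 1
--                 j += 1
--         elif i < len(expected):
--             result.append(f"[-{expected[i]}]")
--             i += 1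
--         else:
--             result.append(f"[+{actual[j]}]")
--             j += 1
--
--     return ''.join(result)
-- ===== SOURCE B (Python) =====
-- def _character_diff(expected: str, actual: str) -> str:
--     """Generate character-level diff visualization."""
--     n = min(len(expected), len(actual))
--     out = []
--     i = 0
--     while i < n:
--         # scan the maximal run of matching characters and append it as one slice
--         j = i
--         while j < n and expected[j] == actual[j]:
--             j += 1
--         out.append(expected[i:j])
--         if j < n:
--             out.append(f"[{expected[j]}\u2192{actual[j]}]")
--             j += 1
--         i = j
--     for c in expected[n:]:
--         out.append(f"[-{c}]")
--     for c in actual[n:]: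
--         out.append(f"[+{c}]")
--     return ''.join(out)
-- ===== Notes on version B (the rewrite author's own statement) =====
-- stated objective: alternative
-- what changed: Replaced A's per-character lockstep two-pointer loop with a run-length scan: an inner scan finds each maximal run of matching characters and appends it as one whole slice, emitting a bracketed token only at each mismatch, followed by the unmatched tails.
import Mathlib
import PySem

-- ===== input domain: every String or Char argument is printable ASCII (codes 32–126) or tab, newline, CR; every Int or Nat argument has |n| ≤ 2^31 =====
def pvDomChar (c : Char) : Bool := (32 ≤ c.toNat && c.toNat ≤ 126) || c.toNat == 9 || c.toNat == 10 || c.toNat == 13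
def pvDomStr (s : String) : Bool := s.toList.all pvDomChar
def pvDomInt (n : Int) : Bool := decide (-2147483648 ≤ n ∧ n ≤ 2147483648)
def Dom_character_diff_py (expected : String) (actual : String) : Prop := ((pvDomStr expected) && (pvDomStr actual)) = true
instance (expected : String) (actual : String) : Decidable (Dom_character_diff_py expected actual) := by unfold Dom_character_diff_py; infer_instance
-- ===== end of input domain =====

-- B replaces A's per-character lockstep loop by a run-length scan that appends each
-- maximal matching run as one whole slice (objective: alternative); same return value.

-- shared token shapes (the characters of the three f-strings; exact transliteration)
def pvSub (e a : Char) : List Char := ['[', e, '→', a, ']']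
def pvDel (e : Char) : List Char := ['[', '-', e, ']']
def pvAdd (a : Char) : List Char := ['[', '+', a, ']']

-- ===== PORT A =====
-- A's while loop: i and j advance in lockstep while both remain in range, so the
-- loop is the obvious structural recursion over the two remaining character lists.
def pvLoopA : List Char → List Char → List String
  | e :: es, a :: as =>
      (if e == a then String.ofList [e] else String.ofList (pvSub e a)) :: pvLoopA es as
  | e :: es, [] => String.ofList (pvDel e) :: pvLoopA es []
  | [], a :: as => String.ofList (pvAdd a) :: pvLoopA [] as
  | [], [] => []

def character_diff_py (expected : String) (actual : String) : String :=
  PySem.Str.join "" (pvLoopA expected.toList actual.toList)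

-- ===== PORT B =====
-- B's outer while loop over the common region: the inner scan 'while expected[j]==actual[j]'
-- is takeWhile/dropWhile on the zipped common region; each matching run is appended whole.
def pvRunsB (ps : List (Char × Char)) : List String :=
  let run := ps.takeWhile (fun p => p.1 == p.2)
  match h : ps.dropWhile (fun p => p.1 == p.2) with
  | [] => [String.ofList (run.map Prod.fst)]
  | p :: rest =>
      String.ofList (run.map Prod.fst) :: String.ofList (pvSub p.1 p.2) :: pvRunsB rest
termination_by ps.length
decreasing_by
  have := List.length_dropWhile_le (p := fun p : Char × Char => p.1 == p.2) (l := ps)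
  rw [h] at this; simp at this; omega

def character_diff_py_alt (expected : String) (actual : String) : String :=
  let es := expected.toList
  let as := actual.toList
  let n := min es.length as.length
  let common := pvRunsB (es.zip as)
  let delTail := (es.drop n).map (fun c => String.ofList (pvDel c))
  let addTail := (as.drop n).map (fun c => String.ofList (pvAdd c))
  PySem.Str.join "" (common ++ delTail ++ addTail)

-- ===== PRECONDITION & SPEC =====
def Spec_character_diff_py (expected : String) (actual : String) (out : String) : Prop := out = character_diff_py_alt expected actual
instance (expected : String) (actual : String) (out : String) : Decidable (Spec_character_diff_py expected actual out) := by unfold Spec_character_diff_py; infer_instance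

-- ===== CLAIM (what is proved, stated in full; the proofs are below) =====
def Claim_equal_character_diff_py : Prop := ∀ (expected : String) (actual : String), Dom_character_diff_py expected actual → Spec_character_diff_py expected actual (character_diff_py expected actual)

-- ===== LEMMAS AND PROOFS =====
-- ''.join: empty separator joins to the flat concatenation of the pieces
theorem pv_join_empty (l : List (List Char)) :
    PySem.Chars.join [] l = l.flatten := by
  induction l with
  | nil => simp [PySem.Chars.join_nil]
  | cons x l ih =>
      cases l with
      | nil => simp [PySem.Chars.join_singleton]
      | cons y rest => simp [PySem.Chars.join_cons_cons, ih]

def pvTokC (p : Char × Char) : List Char :=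
  if p.1 == p.2 then [p.1] else pvSub p.1 p.2

theorem pv_flatten_all_eq (ps : List (Char × Char)) (h : ∀ p ∈ ps, p.1 == p.2) :
    (ps.map pvTokC).flatten = ps.map Prod.fst := by
  induction ps with
  | nil => simp
  | cons p ps ih =>
      have hp := h p (by simp)
      have hps := ih (fun q hq => h q (List.mem_cons_of_mem _ hq))
      simp [pvTokC, hp, hps]

theorem pv_runsB_flatten (ps : List (Char × Char)) :
    ((pvRunsB ps).map String.toList).flatten = (ps.map pvTokC).flatten := by
  induction ps using pvRunsB.induct with
  | case1 ps h =>
      rw [pvRunsB]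
      split
      case h_2 q rest' heq => rw [h] at heq; simp at heq
      case h_1 heq =>
      have hps : ps.takeWhile (fun p : Char × Char => p.1 == p.2) = ps := by
        have := List.takeWhile_append_dropWhile (p := fun p : Char × Char => p.1 == p.2) (l := ps)
        rw [h] at this; simpa using this
      have hall : ∀ p ∈ ps, (p.1 == p.2) = true := by
        intro p hp
        have hmem : p ∈ ps.takeWhile (fun p : Char × Char => p.1 == p.2) := by rw [hps]; exact hp
        exact List.mem_takeWhile_imp (p := fun p : Char × Char => p.1 == p.2) hmem
      simp [hps, pv_flatten_all_eq ps hall]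
  | case2 ps p rest h ih =>
      rw [pvRunsB]
      split
      case h_1 heq => rw [h] at heq; simp at heq
      case h_2 q rest' heq =>
      rw [h] at heq
      injection heq with h1 h2
      subst h1; subst h2
      have hsplit := List.takeWhile_append_dropWhile (p := fun p : Char × Char => p.1 == p.2) (l := ps)
      rw [h] at hsplit
      have hall : ∀ q ∈ ps.takeWhile (fun p : Char × Char => p.1 == p.2), (q.1 == q.2) = true :=
        fun q hq => List.mem_takeWhile_imp (p := fun p : Char × Char => p.1 == p.2) hq
      have hne : ¬ (p.1 == p.2) = true := by
        have := List.head?_dropWhile_not (p := fun p : Char × Char => p.1 == p.2) (l := ps)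
        rw [h] at this; simpa using this
      conv_rhs => rw [← hsplit]
      simp [ih, pv_flatten_all_eq _ hall, pvTokC, hne]

theorem pvLoopA_toList (es as : List Char) :
    (pvLoopA es as).map String.toList =
      (es.zip as).map pvTokC
      ++ (es.drop (min es.length as.length)).map pvDel
      ++ (as.drop (min es.length as.length)).map pvAdd := by
  induction es generalizing as with
  | nil =>
      cases as with
      | nil => simp [pvLoopA]
      | cons a as =>
          induction as with
          | nil => simp [pvLoopA]
          | cons b bs ihb => simp_all [pvLoopA]
  | cons e es ih =>
      cases as with
      | nil =>
          have : ∀ l : List Char, (pvLoopA l []).map String.toList = l.map pvDel := by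
            intro l
            induction l with
            | nil => simp [pvLoopA]
            | cons c cs ihc => simp [pvLoopA, ihc]
          simp [this]
      | cons a as =>
          simp [pvLoopA, pvTokC, ih as, Nat.succ_min_succ]
          split_ifs <;> simp

-- ===== VERDICT (by name: the statement is the Claim_ definition above) =====
theorem character_diff_py_spec : Claim_equal_character_diff_py := by
  intro expected actual _
  unfold Spec_character_diff_py character_diff_py character_diff_py_alt
  simp only [PySem.Str.join]
  congr 1
  have hsep : ("" : String).toList = [] := rfl
  rw [hsep, pv_join_empty, pv_join_empty]
  rw [pvLoopA_toList]
  simp [pv_runsB_flatten, Function.comp_def]
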